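-- pv_equiv track=rewrite | github.com/gervais-amoah/30DaysOfPython | Day_20/main.py | get_country_breed_frequency
-- ===== SOURCE A (Python) =====
-- def get_country_breed_frequency(breeds):
--     country_breed_count = {}
--
--     for breed in breeds:
--         country = breed.get('origin', 'Unknown')
--         breed_name = breed.get('name', 'Unknown')
--
--         if country not in country_breed_count:
--             country_breed_count[country] = {}
--
--         if breed_name not in country_breed_count[country]:
--             country_breed_count[country][breed_name] = 0
--
--         country_breed_count[country][breed_name] += 1
--
--     return country_breed_count
-- ===== SOURCE B (Python) =====
-- def get_country_breed_frequency(breeds):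
--     groups = {}
--     for breed in breeds:
--         groups.setdefault(breed.get('origin', 'Unknown'), []).append(breed.get('name', 'Unknown'))
--     return {
--         country: {name: names.count(name) for name in dict.fromkeys(names)}
--         for country, names in groups.items()
--     }
-- ===== Notes on version B (the rewrite author's own statement) =====
-- stated objective: alternative
-- what changed: A interleaves grouping and counting in one fold over a nested dict; B first groups breed names by country into lists, then tallies each list separately (first-occurrence order, list.count), a collect-then-tally two-pass structure.
import Mathlib
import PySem

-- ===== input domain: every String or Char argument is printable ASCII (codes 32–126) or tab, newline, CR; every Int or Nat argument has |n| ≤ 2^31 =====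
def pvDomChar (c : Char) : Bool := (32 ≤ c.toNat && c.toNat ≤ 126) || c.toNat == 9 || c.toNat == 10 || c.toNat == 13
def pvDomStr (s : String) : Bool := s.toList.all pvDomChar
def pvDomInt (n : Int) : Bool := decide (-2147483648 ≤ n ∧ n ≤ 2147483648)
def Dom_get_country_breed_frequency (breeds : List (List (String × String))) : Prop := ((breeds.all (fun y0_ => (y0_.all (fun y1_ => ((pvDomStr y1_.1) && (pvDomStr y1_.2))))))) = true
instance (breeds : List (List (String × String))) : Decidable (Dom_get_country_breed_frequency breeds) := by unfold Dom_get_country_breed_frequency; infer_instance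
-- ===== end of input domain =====

-- B restructures A's single interleaved fold into collect-then-tally: group names by country, then count each group; return values are identical.

-- ===== PORT A =====
-- loop body of A: ensure the country key, ensure the breed-name key at 0, then += 1
def pvStepA (d : PySem.Dict String (PySem.Dict String Int)) (b : List (String × String)) :
    PySem.Dict String (PySem.Dict String Int) :=
  let country := (PySem.Dict.mk b).getD "origin" "Unknown"
  let breed_name := (PySem.Dict.mk b).getD "name" "Unknown"
  let d1 := if d.contains country then d else d.insert country PySem.Dict.empty
  let inner := d1.getD country PySem.Dict.empty
  let inner1 := if inner.contains breed_name then inner else inner.insert breed_name 0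
  d1.insert country (inner1.insert breed_name (inner1.getD breed_name 0 + 1))

def get_country_breed_frequency (breeds : List (List (String × String))) : List (String × List (String × Int)) :=
  let country_breed_count := breeds.foldl pvStepA PySem.Dict.empty
  country_breed_count.items.map (fun p => (p.1, p.2.items))

-- ===== PORT B =====
-- loop body of B's phase one: groups.setdefault(origin, []).append(name)
def pvStepB (g : PySem.Dict String (List String)) (b : List (String × String)) :
    PySem.Dict String (List String) :=
  g.modify ((PySem.Dict.mk b).getD "origin" "Unknown") []
    (fun ns => ns ++ [(PySem.Dict.mk b).getD "name" "Unknown"])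

def get_country_breed_frequency_alt (breeds : List (List (String × String))) : List (String × List (String × Int)) :=
  let groups := breeds.foldl pvStepB PySem.Dict.empty
  groups.items.map (fun p =>
    (p.1, (PySem.List.dedup p.2).map (fun name => (name, (p.2.count name : Int)))))

-- ===== PRECONDITION & SPEC =====
def Spec_get_country_breed_frequency (breeds : List (List (String × String))) (out : List (String × List (String × Int))) : Prop := out = get_country_breed_frequency_alt breeds
instance (breeds : List (List (String × String))) (out : List (String × List (String × Int))) : Decidable (Spec_get_country_breed_frequency breeds out) := by unfold Spec_get_country_breed_frequency; infer_instance

-- ===== CLAIM (what is proved, stated in full; the proofs are below) =====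
def Claim_equal_get_country_breed_frequency : Prop := ∀ (breeds : List (List (String × String))), Dom_get_country_breed_frequency breeds → Spec_get_country_breed_frequency breeds (get_country_breed_frequency breeds)

-- ===== LEMMAS AND PROOFS =====

-- B's grouping state, mapped through Counter, is A's nested-dict state.
def pvF (g : PySem.Dict String (List String)) : PySem.Dict String (PySem.Dict String Int) :=
  PySem.Dict.mk (g.items.map (fun p => (p.1, PySem.Dict.counter p.2)))

theorem pv_keys_F (g : PySem.Dict String (List String)) : (pvF g).keys = g.keys := by
  simp [pvF, PySem.Dict.keys, List.map_map]

theorem pv_contains_F (g : PySem.Dict String (List String)) (c : String) :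
    (pvF g).contains c = g.contains c := by
  simp only [pvF, PySem.Dict.contains, List.any_map]
  congr 1

theorem pv_insert_insert_same {κ ν : Type} [BEq κ] [LawfulBEq κ]
    (d : PySem.Dict κ ν) (k : κ) (v w : ν) : (d.insert k v).insert k w = d.insert k w := by
  apply PySem.Dict.ext
  by_cases h : d.contains k = true
  · rw [PySem.Dict.items_insert_of_contains _ _ (PySem.Dict.contains_insert_self d k v),
        PySem.Dict.items_insert_of_contains _ _ h, PySem.Dict.items_insert_of_contains _ _ h,
        List.map_map]
    apply List.map_congr_left
    intro p _
    by_cases hp : (p.1 == k) = true <;> simp [hp]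
  · have h' : d.contains k = false := by simpa using h
    have hall : ∀ p ∈ d.items, (p.1 == k) = false := by
      intro p hp
      have h2 : ¬ (p.1 == k) = true := by
        intro hk
        have hc : d.contains k = true := by
          simp only [PySem.Dict.contains, List.any_eq_true]
          exact ⟨p, hp, hk⟩
        simp [h'] at hc
      simpa using h2
    rw [PySem.Dict.items_insert_of_contains _ _ (PySem.Dict.contains_insert_self d k v),
        PySem.Dict.items_insert_of_not_contains _ _ h',
        PySem.Dict.items_insert_of_not_contains _ _ h', List.map_append]
    simp
    have hmap : d.items.map (fun p => if (p.1 == k) = true then (k, w) else p) = d.items.map id := by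
      apply List.map_congr_left; intro p hp; simp [hall p hp]
    simp [hmap]

theorem pv_counter_step (xs : List String) (n : String) :
    (if (PySem.Dict.counter xs).contains n then PySem.Dict.counter xs
     else (PySem.Dict.counter xs).insert n 0).insert n
      ((if (PySem.Dict.counter xs).contains n then PySem.Dict.counter xs
        else (PySem.Dict.counter xs).insert n 0).getD n 0 + 1)
    = PySem.Dict.counter (xs ++ [n]) := by
  rw [PySem.Dict.counter_append_singleton]
  by_cases h : (PySem.Dict.counter xs).contains n = true
  · simp only [h, if_true]; rfl
  · have h' : (PySem.Dict.counter xs).contains n = false := by simpa using h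
    simp only [h', Bool.false_eq_true, if_false]
    rw [PySem.Dict.getD_insert_self, pv_insert_insert_same]
    simp [PySem.Dict.modify, PySem.Dict.getD_of_not_contains _ _ h']

theorem pv_items_F (g : PySem.Dict String (List String)) :
    (pvF g).items = g.items.map (fun p => (p.1, PySem.Dict.counter p.2)) := rfl

theorem pv_insert_F (g : PySem.Dict String (List String)) (c : String) (xs : List String) :
    (pvF g).insert c (PySem.Dict.counter xs) = pvF (g.insert c xs) := by
  apply PySem.Dict.ext
  by_cases h : g.contains c = true
  · have hF : (pvF g).contains c = true := by rw [pv_contains_F]; exact h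
    rw [PySem.Dict.items_insert_of_contains _ _ hF, pv_items_F, pv_items_F,
        PySem.Dict.items_insert_of_contains _ _ h, List.map_map, List.map_map]
    apply List.map_congr_left
    intro p _
    by_cases hp : p.1 = c <;> simp [hp]
  · have h' : g.contains c = false := by simpa using h
    have hF : (pvF g).contains c = false := by rw [pv_contains_F]; exact h'
    rw [PySem.Dict.items_insert_of_not_contains _ _ hF, pv_items_F, pv_items_F,
        PySem.Dict.items_insert_of_not_contains _ _ h', List.map_append]
    simp

theorem pv_step_comm (g : PySem.Dict String (List String)) (hnd : g.keys.Nodup)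
    (b : List (String × String)) : pvStepA (pvF g) b = pvF (pvStepB g b) := by
  unfold pvStepA pvStepB
  set c := (PySem.Dict.mk b).getD "origin" "Unknown" with hc
  set n := (PySem.Dict.mk b).getD "name" "Unknown" with hn
  by_cases hcon : g.contains c = true
  · obtain ⟨names, hget⟩ : ∃ v, g.get? c = some v := by
      cases hh : g.get? c with
      | none =>
          rw [PySem.Dict.get?_eq_none_iff_contains] at hh
          rw [hcon] at hh; cases hh
      | some v => exact ⟨v, rfl⟩
    have hgd : g.getD c [] = names := PySem.Dict.getD_of_get?_eq_some g [] hget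
    have hmem : (c, PySem.Dict.counter names) ∈ (pvF g).items := by
      simp only [pvF]
      exact List.mem_map.mpr ⟨(c, names), PySem.Dict.mem_items_of_get?_eq_some g hget, rfl⟩
    have hndF : (pvF g).keys.Nodup := by rw [pv_keys_F]; exact hnd
    have hinner : (pvF g).getD c PySem.Dict.empty = PySem.Dict.counter names :=
      PySem.Dict.getD_of_mem_items _ hmem hndF _
    have hconF : (pvF g).contains c = true := by rw [pv_contains_F]; exact hcon
    simp only [hconF, if_true, hinner]
    rw [pv_counter_step names n]
    rw [show g.modify c [] (fun ns => ns ++ [n]) = g.insert c (names ++ [n]) by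
          simp [PySem.Dict.modify, hgd]]
    exact pv_insert_F g c (names ++ [n])
  · have hcon' : g.contains c = false := by simpa using hcon
    have hconF : (pvF g).contains c = false := by rw [pv_contains_F]; exact hcon'
    simp only [hconF, Bool.false_eq_true, if_false]
    rw [PySem.Dict.getD_insert_self]
    rw [show (PySem.Dict.empty : PySem.Dict String Int) = PySem.Dict.counter [] from rfl]
    rw [pv_counter_step [] n, pv_insert_insert_same]
    rw [show g.modify c [] (fun ns => ns ++ [n]) = g.insert c ([] ++ [n]) by
          simp [PySem.Dict.modify, PySem.Dict.getD_of_not_contains _ _ hcon']]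
    exact pv_insert_F g c ([] ++ [n])

theorem pv_fold_comm (bs : List (List (String × String))) (g : PySem.Dict String (List String))
    (hnd : g.keys.Nodup) :
    bs.foldl pvStepA (pvF g) = pvF (bs.foldl pvStepB g) := by
  induction bs generalizing g with
  | nil => rfl
  | cons b bs ih =>
      simp only [List.foldl_cons]
      rw [pv_step_comm g hnd b]
      exact ih (pvStepB g b) (by
        simpa [pvStepB, PySem.Dict.modify] using
          PySem.Dict.nodup_keys_insert g _ _ hnd)

-- ===== VERDICT (by name: the statement is the Claim_ definition above) =====
theorem get_country_breed_frequency_spec : Claim_equal_get_country_breed_frequency := by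
  intro breeds _
  unfold Spec_get_country_breed_frequency get_country_breed_frequency get_country_breed_frequency_alt
  have h0 : (PySem.Dict.empty : PySem.Dict String (PySem.Dict String Int)) = pvF PySem.Dict.empty := rfl
  rw [h0, pv_fold_comm breeds PySem.Dict.empty (by simp [PySem.Dict.empty, PySem.Dict.keys])]
  simp [pvF, List.map_map, PySem.Dict.items_counter, PySem.List.dedup_eq_ofList, Function.comp]
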